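-- pv_equiv track=rewrite | github.com/cmolodowitch/dgmd-pill-matcher-models | test_utils.py | generate_regex_chars
-- ===== SOURCE A (Python) =====
-- from typing import List, Tuple
--
-- def generate_regex_chars(prediction: str) -> List[str]:
--     regex_chars = []
--     for char in prediction:
--         # o and 0 are frequently confused
--         if char in {"o", "0"}:
--             regex_chars.append("[o0]")
--         # e, 3, 8, s, and 5 seem to be often interchanged
--         elif char in {"e", "3", "8", "5", "s"}:
--             regex_chars.append("[e385s]")
--         # 1, i, and l are frequently confused
--         elif char in {"1", "l", "i"}:
--             regex_chars.append("[1il]")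
--         elif char in {"4", "a"}:
--             regex_chars.append("[4a]")
--         else:
--             regex_chars.append(char)
--
--     return regex_chars
-- ===== SOURCE B (Python) =====
-- def generate_regex_chars(prediction):
--     out = list(prediction)
--     for group in ("o0", "e385s", "1il", "4a"):
--         repl = "[" + group + "]"
--         out = [repl if len(c) == 1 and c in group else c for c in out]
--     return out
-- ===== Notes on version B (the rewrite author's own statement) =====
-- stated objective: alternative
-- what changed: B inverts the loop structure: instead of A's single pass over the characters with a four-way if/elif cascade, B starts from the list of single characters and makes one staged rewriting pass over the whole output list per confusable group (outer loop over groups, inner map over the list).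
import Mathlib
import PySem

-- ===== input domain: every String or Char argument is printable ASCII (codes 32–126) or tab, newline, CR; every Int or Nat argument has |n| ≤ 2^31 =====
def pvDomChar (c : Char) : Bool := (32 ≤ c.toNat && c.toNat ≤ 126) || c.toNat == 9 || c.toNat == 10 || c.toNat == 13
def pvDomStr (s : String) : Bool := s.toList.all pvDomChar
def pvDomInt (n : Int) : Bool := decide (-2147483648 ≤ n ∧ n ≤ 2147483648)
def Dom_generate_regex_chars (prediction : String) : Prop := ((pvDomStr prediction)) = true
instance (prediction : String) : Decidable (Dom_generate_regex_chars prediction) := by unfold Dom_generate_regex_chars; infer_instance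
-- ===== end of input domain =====

-- B replaces A's single char loop with a four-way branch cascade by an outer loop over the
-- four confusable groups, each making a staged rewriting pass over the output list;
-- objective: alternative, same cost.

-- ===== PORT A =====
def generate_regex_chars (prediction : String) : List String :=
  prediction.toList.foldl (fun regex_chars char =>
    if char == 'o' || char == '0' then regex_chars ++ ["[o0]"]
    else if char == 'e' || char == '3' || char == '8' || char == '5' || char == 's' then
      regex_chars ++ ["[e385s]"]
    else if char == '1' || char == 'l' || char == 'i' then regex_chars ++ ["[1il]"]
    else if char == '4' || char == 'a' then regex_chars ++ ["[4a]"]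
    else regex_chars ++ [String.ofList [char]]) []

-- ===== PORT B =====
-- one group's pass: `len(c) == 1 and c in group` — for a length-1 string the Python substring
-- test `c in group` is exactly char membership, ported as the [ch] match + contains (exact there)
def pvGroupPass (group : String) (out : List String) : List String :=
  out.map (fun c =>
    match c.toList with
    | [ch] => if group.toList.contains ch then "[" ++ group ++ "]" else c
    | _ => c)

def generate_regex_chars_alt (prediction : String) : List String :=
  (["o0", "e385s", "1il", "4a"] : List String).foldl
    (fun out group => pvGroupPass group out)
    (prediction.toList.map (fun c => String.ofList [c]))

-- ===== PRECONDITION & SPEC =====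
def Spec_generate_regex_chars (prediction : String) (out : List String) : Prop := out = generate_regex_chars_alt prediction
instance (prediction : String) (out : List String) : Decidable (Spec_generate_regex_chars prediction out) := by unfold Spec_generate_regex_chars; infer_instance

-- ===== CLAIM (what is proved, stated in full; the proofs are below) =====
def Claim_equal_generate_regex_chars : Prop := ∀ (prediction : String), Dom_generate_regex_chars prediction → Spec_generate_regex_chars prediction (generate_regex_chars prediction)

-- ===== LEMMAS AND PROOFS =====

-- A's per-character branch value
def pvStepA (c : Char) : String :=
  if c == 'o' || c == '0' then "[o0]"
  else if c == 'e' || c == '3' || c == '8' || c == '5' || c == 's' then "[e385s]"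
  else if c == '1' || c == 'l' || c == 'i' then "[1il]"
  else if c == '4' || c == 'a' then "[4a]"
  else String.ofList [c]

-- B composed per character (B's four staged passes fuse, per element, to this)
def pvStepB (c : Char) : String :=
  (["o0", "e385s", "1il", "4a"] : List String).foldl
    (fun s group =>
      match s.toList with
      | [ch] => if group.toList.contains ch then "[" ++ group ++ "]" else s
      | _ => s)
    (String.ofList [c])

lemma step_eq (c : Char) : pvStepB c = pvStepA c := by
  unfold pvStepA
  split_ifs with h1 h2 h3 h4
  · simp only [Bool.or_eq_true, beq_iff_eq] at h1
    rcases h1 with rfl | rfl <;> decide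
  · simp only [Bool.or_eq_true, beq_iff_eq] at h2
    rcases h2 with ((((rfl | rfl) | rfl) | rfl) | rfl) <;> decide
  · simp only [Bool.or_eq_true, beq_iff_eq] at h3
    rcases h3 with ((rfl | rfl) | rfl) <;> decide
  · simp only [Bool.or_eq_true, beq_iff_eq] at h4
    rcases h4 with rfl | rfl <;> decide
  · simp only [Bool.or_eq_true, beq_iff_eq, not_or] at h1 h2 h3 h4
    obtain ⟨n1, n2⟩ := h1
    obtain ⟨⟨⟨⟨n3, n4⟩, n5⟩, n6⟩, n7⟩ := h2
    obtain ⟨⟨n8, n9⟩, n10⟩ := h3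
    obtain ⟨n11, n12⟩ := h4
    simp only [pvStepB, List.foldl_cons, List.foldl_nil, String.toList_ofList]
    simp [n1, n2, n3, n4, n5, n6, n7, n8, n9, n10, n11, n12]

-- B's staged passes over the whole list fuse into one map of the per-element composition
set_option maxHeartbeats 2000000 in
lemma alt_eq_map (p : String) :
    generate_regex_chars_alt p = p.toList.map pvStepB := by
  unfold generate_regex_chars_alt pvGroupPass pvStepB
  simp only [List.foldl_cons, List.foldl_nil, List.map_map]
  rfl

-- A's fold with append is the map of its branch value
lemma a_fold_eq (l : List Char) (acc : List String) :
    (l.foldl (fun regex_chars char =>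
      if char == 'o' || char == '0' then regex_chars ++ ["[o0]"]
      else if char == 'e' || char == '3' || char == '8' || char == '5' || char == 's' then
        regex_chars ++ ["[e385s]"]
      else if char == '1' || char == 'l' || char == 'i' then regex_chars ++ ["[1il]"]
      else if char == '4' || char == 'a' then regex_chars ++ ["[4a]"]
      else regex_chars ++ [String.ofList [char]]) acc)
    = acc ++ l.map pvStepA := by
  induction l generalizing acc with
  | nil => simp
  | cons c t ih =>
    simp only [List.foldl_cons, List.map_cons, ih, pvStepA]
    split_ifs <;> simp

-- ===== VERDICT (by name: the statement is the Claim_ definition above) =====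
theorem generate_regex_chars_spec : Claim_equal_generate_regex_chars := by
  intro p _
  show generate_regex_chars p = generate_regex_chars_alt p
  unfold generate_regex_chars
  rw [a_fold_eq, List.nil_append, alt_eq_map]
  exact List.map_congr_left (fun c _ => (step_eq c).symm)
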